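-- pv_equiv track=rewrite | github.com/jservonnat/C-ESM-EP | share/cesmep_modules/reference/reference.py | variable2reference
-- ===== SOURCE A (Python) =====
-- def variable2reference(variable, project=None, my_obs={}) :
--   # -- dealing with a custom dictionary of obs (my_obs)
--   table='*'
--   if variable in my_obs:
--        tmpdict = dict(variable=variable)
--        tmpdict.update(my_obs[variable])
--        return tmpdict
--   else:
--     if not project:
--         tmp_Amon_vars = ['pr','prw','rlut', 'rsut' , 'rlutcs', 'rsutcs', 'rlus', 'rsus' , 'rluscs', 'rsuscs', 'rlds', 'rsds',
--                         'rsdscs','rldscs','tas', 'ta', 'ua', 'va', 'psl', 'uas', 'vas','hus','hur','alb','hurs','huss',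
--                         'cltcalipso','clhcalipso','clmcalipso','cllcalipso','hfls','hfss','tauu','tauv',
--                         'ua850', 'ua700', 'ua500', 'ua200',
--                         'ta850', 'ta700', 'ta500', 'ta200',
--                         'va850', 'va700', 'va500', 'va200',
--                         'hus850', 'hus700', 'hus500', 'hus200',
--                         'hur850', 'hur700', 'hur500', 'hur200',
--                         'zg500',
--                         'ua_Atl_sect', 'va_Atl_sect', 'ta_Atl_sect', 'hus_Atl_sect',
--                         'albvis', 'albnir', 'snow', 'gpp','gpptot', 'lai','LAI', 'fluxlat', 'fluxsens', 'pme']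
--         tmp_Omon_vars = ['tos', 'sos', 'zos', 'thetao','to','so','so200','so1000','so2000','to200','to1000','to2000','wfo',
--                           'NO3', 'PO4', 'O2', 'Si',
--                           'PO4_surf', 'O2_surf', 'Si_surf', 'NO3_surf',
--                           'NO3_300m', 'PO4_300m', 'O2_300m', 'Si_300m',
--                           'NO3_1000m', 'PO4_1000m', 'O2_1000m', 'Si_1000m',
--                           'NO3_2500m', 'PO4_2500m', 'O2_2500m', 'Si_2500m']
--         tmp_OImon_vars = ['sic']
--         if variable in tmp_Amon_vars: table='Amon'
--         if variable in tmp_Omon_vars: table='Omon'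
--         if variable in tmp_OImon_vars: table='OImon'
--         if variable in tmp_Amon_vars+tmp_Omon_vars+tmp_OImon_vars:
--             project='ref_climatos'
--         else:
--             project='ref_ts'
--     refs = {
--         'ref_climatos' : {
--             'CERES'  : [ 'rlut', 'rsut' , 'rlutcs', 'rsutcs', 'rlus', 'rsus' , 'rluscs', 'rsuscs', 'rlds', 'rsds', 'rsdscs','rldscs' ] ,
--             'ERAINT' : [ 'tas', 'ta', 'psl', 'uas', 'vas' ,'hus','hur','huss', 'ua', 'va','wfo',
--                          'ua850', 'ua700', 'ua500', 'ua200',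
--                          'ta850', 'ta700', 'ta500', 'ta200',
--                          'va850', 'va700', 'va500', 'va200',
--                          'hus850', 'hus700', 'hus500', 'hus200',
--                          'hur850', 'hur700', 'hur500', 'hur200',
--                          'zg500',
--                          'ua_Atl_sect', 'va_Atl_sect', 'ta_Atl_sect', 'hus_Atl_sect',
--                        ],
--             'RSS'    : [ 'prw' ],
--             'GPCP'   : ['pr'],
--             'NSIDC'  : ['sic'],
--             'WOA13-v2': ['thetao','so','to','tos','to200','to1000','to2000','so200','so1000','so2000'],
--             'NODC-WOA09' : [ 'sos'],
--             'WOA09': ['NO3', 'PO4', 'O2', 'Si',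
--                       'NO3_surf', 'PO4_surf', 'O2_surf', 'Si_surf',
--                       'NO3_300m',  'PO4_300m', 'O2_300m', 'Si_300m',
--                       'NO3_2500m', 'PO4_2500m', 'O2_2500m', 'Si_2500m',
--                       'NO3_1000m', 'PO4_1000m', 'O2_1000m', 'Si_1000m',],
--             'CNES-AVISO-L4': [ 'zos' ],
--             'DeBoyerM' : ['mlotst','omlmax'],
--             'CLARA-A1-1deg': ['alb'],
--             'DASILVA': ['hurs'],
--             'HOAPS3': ['hfls','hfss'],
--             'LMDZ-OBS': ['tauu','tauv','pme','tauuo','tauvo'],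
--             'CERES-EBAF':['cltcalipso','clhcalipso','clmcalipso','cllcalipso'],
--             'EnsembleGPP':['gpp','gpptot'],
--             'GIMM3G':['lai','LAI'],
--             'MODIS':['albnir','albvis','snow'],
--             'EnsembleHcor':['fluxsens'],
--             'EnsembleLEcor':['fluxlat'],
--         },
--         'ref_ts' : {
--             'ERAInterim' : [ 'tas', 'psl' , 'uas' , 'vas', 'cldl', 'cldm', 'cldh' ],
--             'GPCP'   : [ 'pr'],
--             'CERES'  : [ 'rlut'  ,  'rsut'  ,      'rlutcs',   'rsutcs' ],
--             'NCEP'   : [ 'huss' ],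
--             'MODIS-L3-C5' : ['clt'],
--             'CLARA-A1-1deg': ['alb'],
--             'NSIDC' : ['sic'],
--         }
--     }
--     # -- Update the dictionary
--     #refs.update(my_obs)
--     if project in refs :
--         for product in refs[project] :
--             if variable in refs[project][product] :
--                if project=='ref_climatos': return {'project':project,'product':product,'variable':variable, 'frequency':'annual_cycle', 'table':table}
--                if project=='ref_ts': return {'project':project,'product':product,'variable':variable, 'frequency':'monthly'}
-- ===== SOURCE B (Python) =====
-- # B: one-time flattened lookup tables (variable -> product / table) instead of A's
-- # per-call scans over nested product lists; same results.
--
-- _CLIM_PRODUCT = {'LAI': 'GIMM3G', 'NO3': 'WOA09', 'NO3_1000m': 'WOA09', 'NO3_2500m': 'WOA09', 'NO3_300m': 'WOA09', 'NO3_surf': 'WOA09', 'O2': 'WOA09', 'O2_1000m': 'WOA09', 'O2_2500m': 'WOA09', 'O2_300m': 'WOA09', 'O2_surf': 'WOA09', 'PO4': 'WOA09', 'PO4_1000m': 'WOA09', 'PO4_2500m': 'WOA09', 'PO4_300m': 'WOA09', 'PO4_surf': 'WOA09', 'Si': 'WOA09', 'Si_1000m': 'WOA09', 'Si_2500m': 'WOA09',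 'Si_300m': 'WOA09', 'Si_surf': 'WOA09', 'alb': 'CLARA-A1-1deg', 'albnir': 'MODIS', 'albvis': 'MODIS', 'clhcalipso': 'CERES-EBAF', 'cllcalipso': 'CERES-EBAF', 'clmcalipso': 'CERES-EBAF', 'cltcalipso': 'CERES-EBAF', 'fluxlat': 'EnsembleLEcor', 'fluxsens': 'EnsembleHcor', 'gpp': 'EnsembleGPP', 'gpptot': 'EnsembleGPP', 'hfls': 'HOAPS3', 'hfss': 'HOAPS3', 'hur': 'ERAINT', 'hur200': 'ERAINT', 'hur500': 'ERAINT', 'hur700': 'ERAINT', 'hur850': 'ERAINT', 'hurs': 'DASILVA', 'hus': 'ERAINT', 'hus200': 'ERAINT', 'hus500': 'ERAINT', 'hus700': 'ERAINT', 'hus850': 'ERAINT', 'hus_Atl_sect': 'ERAINT', 'huss': 'ERAINT', 'lai': 'GIMM3G', 'mlotst': 'DeBoyerM', 'omlmax': 'DeBoyerM', 'pme': 'LMDZ-OBS', 'pr': 'GPCP', 'prw': 'RSS', 'psl': 'ERAINT', 'rlds': 'CERES', 'rldscs': 'CERES', 'rlus': 'CERES', 'rluscs': 'CERES', 'rlut':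 'CERES', 'rlutcs': 'CERES', 'rsds': 'CERES', 'rsdscs': 'CERES', 'rsus': 'CERES', 'rsuscs': 'CERES', 'rsut': 'CERES', 'rsutcs': 'CERES', 'sic': 'NSIDC', 'snow': 'MODIS', 'so': 'WOA13-v2', 'so1000': 'WOA13-v2', 'so200': 'WOA13-v2', 'so2000': 'WOA13-v2', 'sos': 'NODC-WOA09', 'ta': 'ERAINT', 'ta200': 'ERAINT', 'ta500': 'ERAINT', 'ta700': 'ERAINT', 'ta850': 'ERAINT', 'ta_Atl_sect': 'ERAINT', 'tas': 'ERAINT', 'tauu': 'LMDZ-OBS', 'tauuo': 'LMDZ-OBS', 'tauv': 'LMDZ-OBS', 'tauvo': 'LMDZ-OBS', 'thetao': 'WOA13-v2', 'to': 'WOA13-v2', 'to1000': 'WOA13-v2', 'to200': 'WOA13-v2', 'to2000': 'WOA13-v2', 'tos': 'WOA13-v2', 'ua': 'ERAINT', 'ua200': 'ERAINT', 'ua500': 'ERAINT', 'ua700': 'ERAINT', 'ua850': 'ERAINT', 'ua_Atl_sect': 'ERAINT', 'uas': 'ERAINT', 'va': 'ERAINT', 'va200': 'ERAINT', 'va500':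 'ERAINT', 'va700': 'ERAINT', 'va850': 'ERAINT', 'va_Atl_sect': 'ERAINT', 'vas': 'ERAINT', 'wfo': 'ERAINT', 'zg500': 'ERAINT', 'zos': 'CNES-AVISO-L4'}
--
-- _TS_PRODUCT = {'alb': 'CLARA-A1-1deg', 'cldh': 'ERAInterim', 'cldl': 'ERAInterim', 'cldm': 'ERAInterim', 'clt': 'MODIS-L3-C5', 'huss': 'NCEP', 'pr': 'GPCP', 'psl': 'ERAInterim', 'rlut': 'CERES', 'rlutcs': 'CERES', 'rsut': 'CERES', 'rsutcs': 'CERES', 'sic': 'NSIDC', 'tas': 'ERAInterim', 'uas': 'ERAInterim', 'vas': 'ERAInterim'}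
--
-- _TABLE = {'LAI': 'Amon', 'NO3': 'Omon', 'NO3_1000m': 'Omon', 'NO3_2500m': 'Omon', 'NO3_300m': 'Omon', 'NO3_surf': 'Omon', 'O2': 'Omon', 'O2_1000m': 'Omon', 'O2_2500m': 'Omon', 'O2_300m': 'Omon', 'O2_surf': 'Omon', 'PO4': 'Omon', 'PO4_1000m': 'Omon', 'PO4_2500m': 'Omon', 'PO4_300m': 'Omon', 'PO4_surf': 'Omon', 'Si': 'Omon', 'Si_1000m': 'Omon', 'Si_2500m': 'Omon', 'Si_300m': 'Omon', 'Si_surf': 'Omon', 'alb': 'Amon', 'albnir': 'Amon', 'albvis': 'Amon', 'clhcalipso': 'Amon', 'cllcalipso': 'Amon', 'clmcalipso': 'Amon', 'cltcalipso': 'Amon', 'fluxlat': 'Amon', 'fluxsens': 'Amon', 'gpp': 'Amon', 'gpptot': 'Amon', 'hfls': 'Amon', 'hfss': 'Amon', 'hur': 'Amon', 'hur200': 'Amon', 'hur500': 'Amon', 'hur700': 'Amon', 'hur850': 'Amon', 'hurs': 'Amon', 'hus': 'Amon', 'hus200': 'Amon', 'hus500': 'Amon', 'hus700': 'Amon', 'hus850':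 'Amon', 'hus_Atl_sect': 'Amon', 'huss': 'Amon', 'lai': 'Amon', 'pme': 'Amon', 'pr': 'Amon', 'prw': 'Amon', 'psl': 'Amon', 'rlds': 'Amon', 'rldscs': 'Amon', 'rlus': 'Amon', 'rluscs': 'Amon', 'rlut': 'Amon', 'rlutcs': 'Amon', 'rsds': 'Amon', 'rsdscs': 'Amon', 'rsus': 'Amon', 'rsuscs': 'Amon', 'rsut': 'Amon', 'rsutcs': 'Amon', 'sic': 'OImon', 'snow': 'Amon', 'so': 'Omon', 'so1000': 'Omon', 'so200': 'Omon', 'so2000': 'Omon', 'sos': 'Omon', 'ta': 'Amon', 'ta200': 'Amon', 'ta500': 'Amon', 'ta700': 'Amon', 'ta850': 'Amon', 'ta_Atl_sect': 'Amon', 'tas': 'Amon', 'tauu': 'Amon', 'tauv': 'Amon', 'thetao': 'Omon', 'to': 'Omon', 'to1000': 'Omon', 'to200': 'Omon', 'to2000': 'Omon', 'tos': 'Omon', 'ua': 'Amon', 'ua200': 'Amon', 'ua500': 'Amon', 'ua700': 'Amon', 'ua850': 'Amon', 'ua_Atl_sect': 'Amon', 'uas': 'Amon', 'va': 'Amon',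 'va200': 'Amon', 'va500': 'Amon', 'va700': 'Amon', 'va850': 'Amon', 'va_Atl_sect': 'Amon', 'vas': 'Amon', 'wfo': 'Omon', 'zg500': 'Amon', 'zos': 'Omon'}
--
-- def variable2reference(variable, project=None, my_obs={}):
--     if variable in my_obs:
--         return {'variable': variable, **my_obs[variable]}
--     table = '*'
--     if not project:
--         if variable in _TABLE:
--             project, table = 'ref_climatos', _TABLE[variable]
--         else:
--             project = 'ref_ts'
--     if project == 'ref_climatos':
--         product = _CLIM_PRODUCT.get(variable)
--         if product is not None:
--             return {'project': project, 'product': product, 'variable': variable,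
--                     'frequency': 'annual_cycle', 'table': table}
--     elif project == 'ref_ts':
--         product = _TS_PRODUCT.get(variable)
--         if product is not None:
--             return {'project': project, 'product': product, 'variable': variable,
--                     'frequency': 'monthly'}
-- ===== Notes on version B (the rewrite author's own statement) =====
-- stated objective: simpler
-- what changed: B replaces A's per-call scans over the nested product->variables lists and the three table lists by flattened one-level lookup tables (variable->product for each project and variable->table), so each call is a couple of direct dict lookups.
import Mathlib
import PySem

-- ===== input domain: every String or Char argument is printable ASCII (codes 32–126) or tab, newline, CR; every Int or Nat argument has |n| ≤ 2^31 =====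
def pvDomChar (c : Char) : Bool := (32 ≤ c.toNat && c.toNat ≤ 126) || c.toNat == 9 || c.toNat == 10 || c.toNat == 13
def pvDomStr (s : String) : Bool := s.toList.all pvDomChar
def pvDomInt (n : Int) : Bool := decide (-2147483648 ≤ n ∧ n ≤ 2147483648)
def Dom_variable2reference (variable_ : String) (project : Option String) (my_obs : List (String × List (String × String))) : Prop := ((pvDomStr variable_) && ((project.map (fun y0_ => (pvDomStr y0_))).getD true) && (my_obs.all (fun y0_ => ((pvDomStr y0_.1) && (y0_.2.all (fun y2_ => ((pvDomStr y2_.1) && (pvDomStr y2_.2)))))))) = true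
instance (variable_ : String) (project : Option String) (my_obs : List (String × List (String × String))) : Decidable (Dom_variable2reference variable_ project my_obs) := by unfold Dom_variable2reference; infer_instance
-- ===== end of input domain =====

-- B replaces A's per-call scans over nested product lists and the three table lists by
-- flattened one-level lookup tables (variable -> product per project, variable -> table):
-- objective 'simpler' — each call is direct lookups; same results.

-- ===== PORT A =====
-- A's data, verbatim: the three table lists and the nested refs (product -> variables)
def pvAmonVars : List String := ["pr","prw","rlut","rsut","rlutcs","rsutcs","rlus","rsus","rluscs","rsuscs","rlds","rsds",
  "rsdscs","rldscs","tas","ta","ua","va","psl","uas","vas","hus","hur","alb","hurs","huss",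
  "cltcalipso","clhcalipso","clmcalipso","cllcalipso","hfls","hfss","tauu","tauv",
  "ua850","ua700","ua500","ua200","ta850","ta700","ta500","ta200",
  "va850","va700","va500","va200","hus850","hus700","hus500","hus200",
  "hur850","hur700","hur500","hur200","zg500",
  "ua_Atl_sect","va_Atl_sect","ta_Atl_sect","hus_Atl_sect",
  "albvis","albnir","snow","gpp","gpptot","lai","LAI","fluxlat","fluxsens","pme"]
def pvOmonVars : List String := ["tos","sos","zos","thetao","to","so","so200","so1000","so2000","to200","to1000","to2000","wfo",
  "NO3","PO4","O2","Si","PO4_surf","O2_surf","Si_surf","NO3_surf",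
  "NO3_300m","PO4_300m","O2_300m","Si_300m","NO3_1000m","PO4_1000m","O2_1000m","Si_1000m",
  "NO3_2500m","PO4_2500m","O2_2500m","Si_2500m"]
def pvOImonVars : List String := ["sic"]
def pvClimRefs : List (String × List String) := [
  ("CERES", ["rlut","rsut","rlutcs","rsutcs","rlus","rsus","rluscs","rsuscs","rlds","rsds","rsdscs","rldscs"]),
  ("ERAINT", ["tas","ta","psl","uas","vas","hus","hur","huss","ua","va","wfo",
    "ua850","ua700","ua500","ua200","ta850","ta700","ta500","ta200",
    "va850","va700","va500","va200","hus850","hus700","hus500","hus200",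
    "hur850","hur700","hur500","hur200","zg500",
    "ua_Atl_sect","va_Atl_sect","ta_Atl_sect","hus_Atl_sect"]),
  ("RSS", ["prw"]),
  ("GPCP", ["pr"]),
  ("NSIDC", ["sic"]),
  ("WOA13-v2", ["thetao","so","to","tos","to200","to1000","to2000","so200","so1000","so2000"]),
  ("NODC-WOA09", ["sos"]),
  ("WOA09", ["NO3","PO4","O2","Si","NO3_surf","PO4_surf","O2_surf","Si_surf",
    "NO3_300m","PO4_300m","O2_300m","Si_300m","NO3_2500m","PO4_2500m","O2_2500m","Si_2500m",
    "NO3_1000m","PO4_1000m","O2_1000m","Si_1000m"]),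
  ("CNES-AVISO-L4", ["zos"]),
  ("DeBoyerM", ["mlotst","omlmax"]),
  ("CLARA-A1-1deg", ["alb"]),
  ("DASILVA", ["hurs"]),
  ("HOAPS3", ["hfls","hfss"]),
  ("LMDZ-OBS", ["tauu","tauv","pme","tauuo","tauvo"]),
  ("CERES-EBAF", ["cltcalipso","clhcalipso","clmcalipso","cllcalipso"]),
  ("EnsembleGPP", ["gpp","gpptot"]),
  ("GIMM3G", ["lai","LAI"]),
  ("MODIS", ["albnir","albvis","snow"]),
  ("EnsembleHcor", ["fluxsens"]),
  ("EnsembleLEcor", ["fluxlat"])]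
def pvTsRefs : List (String × List String) := [
  ("ERAInterim", ["tas","psl","uas","vas","cldl","cldm","cldh"]),
  ("GPCP", ["pr"]),
  ("CERES", ["rlut","rsut","rlutcs","rsutcs"]),
  ("NCEP", ["huss"]),
  ("MODIS-L3-C5", ["clt"]),
  ("CLARA-A1-1deg", ["alb"]),
  ("NSIDC", ["sic"])]

-- A's 'for product in refs[project]' loop with its in-loop returns
def variable2referenceLoop (v proj table : String) : List (String × List String) → Option (List (String × String))
  | [] => none
  | (product, vs) :: rest =>
    if vs.contains v then
      if proj == "ref_climatos" then
        some [("project", proj), ("product", product), ("variable", v), ("frequency", "annual_cycle"), ("table", table)]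
      else if proj == "ref_ts" then
        some [("project", proj), ("product", product), ("variable", v), ("frequency", "monthly")]
      else variable2referenceLoop v proj table rest
    else variable2referenceLoop v proj table rest

def variable2reference (variable_ : String) (project : Option String) (my_obs : List (String × List (String × String))) : Option (List (String × String)) :=
  match (PySem.Dict.ofList my_obs).get? variable_ with
  | some inner => some (((PySem.Dict.ofList [("variable", variable_)]).update inner).items)
  | none =>
    let pg := project.getD ""              -- 'if not project': None or empty string
    let pt : String × String :=
      if pg = "" then
        (if (pvAmonVars ++ pvOmonVars ++ pvOImonVars).contains variable_ then "ref_climatos" else "ref_ts",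
         let table := "*"
         let table := if pvAmonVars.contains variable_ then "Amon" else table
         let table := if pvOmonVars.contains variable_ then "Omon" else table
         let table := if pvOImonVars.contains variable_ then "OImon" else table
         table)
      else (pg, "*")
    if pt.1 == "ref_climatos" then variable2referenceLoop variable_ pt.1 pt.2 pvClimRefs
    else if pt.1 == "ref_ts" then variable2referenceLoop variable_ pt.1 pt.2 pvTsRefs
    else none

-- ===== PORT B =====
-- Source B's flattened one-level tables, verbatim
def pvClimProd : List (String × String) := [
  ("LAI", "GIMM3G"), ("NO3", "WOA09"), ("NO3_1000m", "WOA09"), ("NO3_2500m", "WOA09"), ("NO3_300m", "WOA09"), 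
  ("NO3_surf", "WOA09"), ("O2", "WOA09"), ("O2_1000m", "WOA09"), ("O2_2500m", "WOA09"), ("O2_300m", "WOA09"), 
  ("O2_surf", "WOA09"), ("PO4", "WOA09"), ("PO4_1000m", "WOA09"), ("PO4_2500m", "WOA09"), 
  ("PO4_300m", "WOA09"), ("PO4_surf", "WOA09"), ("Si", "WOA09"), ("Si_1000m", "WOA09"), ("Si_2500m", "WOA09"), 
  ("Si_300m", "WOA09"), ("Si_surf", "WOA09"), ("alb", "CLARA-A1-1deg"), ("albnir", "MODIS"), 
  ("albvis", "MODIS"), ("clhcalipso", "CERES-EBAF"), ("cllcalipso", "CERES-EBAF"), 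
  ("clmcalipso", "CERES-EBAF"), ("cltcalipso", "CERES-EBAF"), ("fluxlat", "EnsembleLEcor"), 
  ("fluxsens", "EnsembleHcor"), ("gpp", "EnsembleGPP"), ("gpptot", "EnsembleGPP"), ("hfls", "HOAPS3"), 
  ("hfss", "HOAPS3"), ("hur", "ERAINT"), ("hur200", "ERAINT"), ("hur500", "ERAINT"), ("hur700", "ERAINT"), 
  ("hur850", "ERAINT"), ("hurs", "DASILVA"), ("hus", "ERAINT"), ("hus200", "ERAINT"), ("hus500", "ERAINT"), 
  ("hus700", "ERAINT"), ("hus850", "ERAINT"), ("hus_Atl_sect", "ERAINT"), ("huss", "ERAINT"), 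
  ("lai", "GIMM3G"), ("mlotst", "DeBoyerM"), ("omlmax", "DeBoyerM"), ("pme", "LMDZ-OBS"), ("pr", "GPCP"), 
  ("prw", "RSS"), ("psl", "ERAINT"), ("rlds", "CERES"), ("rldscs", "CERES"), ("rlus", "CERES"), 
  ("rluscs", "CERES"), ("rlut", "CERES"), ("rlutcs", "CERES"), ("rsds", "CERES"), ("rsdscs", "CERES"), 
  ("rsus", "CERES"), ("rsuscs", "CERES"), ("rsut", "CERES"), ("rsutcs", "CERES"), ("sic", "NSIDC"), 
  ("snow", "MODIS"), ("so", "WOA13-v2"), ("so1000", "WOA13-v2"), ("so200", "WOA13-v2"), ("so2000", "WOA13-v2"), 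
  ("sos", "NODC-WOA09"), ("ta", "ERAINT"), ("ta200", "ERAINT"), ("ta500", "ERAINT"), ("ta700", "ERAINT"), 
  ("ta850", "ERAINT"), ("ta_Atl_sect", "ERAINT"), ("tas", "ERAINT"), ("tauu", "LMDZ-OBS"), 
  ("tauuo", "LMDZ-OBS"), ("tauv", "LMDZ-OBS"), ("tauvo", "LMDZ-OBS"), ("thetao", "WOA13-v2"), 
  ("to", "WOA13-v2"), ("to1000", "WOA13-v2"), ("to200", "WOA13-v2"), ("to2000", "WOA13-v2"), 
  ("tos", "WOA13-v2"), ("ua", "ERAINT"), ("ua200", "ERAINT"), ("ua500", "ERAINT"), ("ua700", "ERAINT"), 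
  ("ua850", "ERAINT"), ("ua_Atl_sect", "ERAINT"), ("uas", "ERAINT"), ("va", "ERAINT"), ("va200", "ERAINT"), 
  ("va500", "ERAINT"), ("va700", "ERAINT"), ("va850", "ERAINT"), ("va_Atl_sect", "ERAINT"), ("vas", "ERAINT"), 
  ("wfo", "ERAINT"), ("zg500", "ERAINT"), ("zos", "CNES-AVISO-L4")]

def pvTsProd : List (String × String) := [
  ("alb", "CLARA-A1-1deg"), ("cldh", "ERAInterim"), ("cldl", "ERAInterim"), ("cldm", "ERAInterim"), 
  ("clt", "MODIS-L3-C5"), ("huss", "NCEP"), ("pr", "GPCP"), ("psl", "ERAInterim"), ("rlut", "CERES"), 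
  ("rlutcs", "CERES"), ("rsut", "CERES"), ("rsutcs", "CERES"), ("sic", "NSIDC"), ("tas", "ERAInterim"), 
  ("uas", "ERAInterim"), ("vas", "ERAInterim")]

def pvTableTbl : List (String × String) := [
  ("LAI", "Amon"), ("NO3", "Omon"), ("NO3_1000m", "Omon"), ("NO3_2500m", "Omon"), ("NO3_300m", "Omon"), 
  ("NO3_surf", "Omon"), ("O2", "Omon"), ("O2_1000m", "Omon"), ("O2_2500m", "Omon"), ("O2_300m", "Omon"), 
  ("O2_surf", "Omon"), ("PO4", "Omon"), ("PO4_1000m", "Omon"), ("PO4_2500m", "Omon"), ("PO4_300m", "Omon"), 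
  ("PO4_surf", "Omon"), ("Si", "Omon"), ("Si_1000m", "Omon"), ("Si_2500m", "Omon"), ("Si_300m", "Omon"), 
  ("Si_surf", "Omon"), ("alb", "Amon"), ("albnir", "Amon"), ("albvis", "Amon"), ("clhcalipso", "Amon"), 
  ("cllcalipso", "Amon"), ("clmcalipso", "Amon"), ("cltcalipso", "Amon"), ("fluxlat", "Amon"), 
  ("fluxsens", "Amon"), ("gpp", "Amon"), ("gpptot", "Amon"), ("hfls", "Amon"), ("hfss", "Amon"), 
  ("hur", "Amon"), ("hur200", "Amon"), ("hur500", "Amon"), ("hur700", "Amon"), ("hur850", "Amon"), 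
  ("hurs", "Amon"), ("hus", "Amon"), ("hus200", "Amon"), ("hus500", "Amon"), ("hus700", "Amon"), 
  ("hus850", "Amon"), ("hus_Atl_sect", "Amon"), ("huss", "Amon"), ("lai", "Amon"), ("pme", "Amon"), 
  ("pr", "Amon"), ("prw", "Amon"), ("psl", "Amon"), ("rlds", "Amon"), ("rldscs", "Amon"), ("rlus", "Amon"), 
  ("rluscs", "Amon"), ("rlut", "Amon"), ("rlutcs", "Amon"), ("rsds", "Amon"), ("rsdscs", "Amon"), 
  ("rsus", "Amon"), ("rsuscs", "Amon"), ("rsut", "Amon"), ("rsutcs", "Amon"), ("sic", "OImon"), 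
  ("snow", "Amon"), ("so", "Omon"), ("so1000", "Omon"), ("so200", "Omon"), ("so2000", "Omon"), ("sos", "Omon"), 
  ("ta", "Amon"), ("ta200", "Amon"), ("ta500", "Amon"), ("ta700", "Amon"), ("ta850", "Amon"), 
  ("ta_Atl_sect", "Amon"), ("tas", "Amon"), ("tauu", "Amon"), ("tauv", "Amon"), ("thetao", "Omon"), 
  ("to", "Omon"), ("to1000", "Omon"), ("to200", "Omon"), ("to2000", "Omon"), ("tos", "Omon"), ("ua", "Amon"), 
  ("ua200", "Amon"), ("ua500", "Amon"), ("ua700", "Amon"), ("ua850", "Amon"), ("ua_Atl_sect", "Amon"), 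
  ("uas", "Amon"), ("va", "Amon"), ("va200", "Amon"), ("va500", "Amon"), ("va700", "Amon"), ("va850", "Amon"), 
  ("va_Atl_sect", "Amon"), ("vas", "Amon"), ("wfo", "Omon"), ("zg500", "Amon"), ("zos", "Omon")]

def variable2reference_alt (variable_ : String) (project : Option String) (my_obs : List (String × List (String × String))) : Option (List (String × String)) :=
  match (PySem.Dict.ofList my_obs).get? variable_ with
  | some inner => some ((PySem.Dict.ofList (("variable", variable_) :: inner)).items)
  | none =>
    let pt : String × String :=
      if project.getD "" = "" then
        if (PySem.Dict.ofList pvTableTbl).contains variable_ then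
          ("ref_climatos", (PySem.Dict.ofList pvTableTbl).getD variable_ "*")
        else ("ref_ts", "*")
      else (project.getD "", "*")
    if pt.1 == "ref_climatos" then
      match (PySem.Dict.ofList pvClimProd).get? variable_ with
      | some product => some [("project", pt.1), ("product", product), ("variable", variable_), ("frequency", "annual_cycle"), ("table", pt.2)]
      | none => none
    else if pt.1 == "ref_ts" then
      match (PySem.Dict.ofList pvTsProd).get? variable_ with
      | some product => some [("project", pt.1), ("product", product), ("variable", variable_), ("frequency", "monthly")]
      | none => none
    else none

-- ===== PRECONDITION & SPEC =====
def Spec_variable2reference (variable_ : String) (project : Option String) (my_obs : List (String × List (String × String))) (out : Option (List (String × String))) : Prop := out = variable2reference_alt variable_ project my_obs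
instance (variable_ : String) (project : Option String) (my_obs : List (String × List (String × String))) (out : Option (List (String × String))) : Decidable (Spec_variable2reference variable_ project my_obs out) := by unfold Spec_variable2reference; infer_instance

-- ===== CLAIM (what is proved, stated in full; the proofs are below) =====
def Claim_equal_variable2reference : Prop := ∀ (variable_ : String) (project : Option String) (my_obs : List (String × List (String × String))), Dom_variable2reference variable_ project my_obs → Spec_variable2reference variable_ project my_obs (variable2reference variable_ project my_obs)

-- ===== LEMMAS AND PROOFS =====

-- first product whose variable list contains v (what A's loop finds)
def pvFirstProd (v : String) : List (String × List String) → Option String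
  | [] => none
  | (p, vs) :: rest => if vs.contains v then some p else pvFirstProd v rest

-- first-match lookup in a flat pair list (what Dict.get? does on the items)
def pvLook (l : List (String × String)) (v : String) : Option String :=
  (l.find? (fun p => p.1 == v)).map (·.2)

-- the table A's three sequential ifs compute, as one option chain
def pvTblSpec (v : String) : Option String :=
  if pvOImonVars.contains v then some "OImon"
  else if pvOmonVars.contains v then some "Omon"
  else if pvAmonVars.contains v then some "Amon"
  else none

theorem pv_get?_of_items (d : PySem.Dict String String) (l : List (String × String)) (v : String)
    (h : d.items = l) : d.get? v = pvLook l v := by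
  simp [PySem.Dict.get?, h, pvLook]

set_option maxRecDepth 100000 in
theorem pv_items_clim : (PySem.Dict.ofList pvClimProd).items = pvClimProd := by decide
set_option maxRecDepth 100000 in
theorem pv_items_ts : (PySem.Dict.ofList pvTsProd).items = pvTsProd := by decide
set_option maxRecDepth 100000 in
theorem pv_items_tbl : (PySem.Dict.ofList pvTableTbl).items = pvTableTbl := by decide

theorem pv_firstProd_eq_none (v : String) (L : List (String × List String))
    (h : ∀ pr ∈ L, v ∉ pr.2) : pvFirstProd v L = none := by
  induction L with
  | nil => rfl
  | cons pr L ih =>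
    have hv : v ∉ pr.2 := h pr (List.mem_cons_self ..)
    cases pr with
    | mk p vs =>
      simp only [pvFirstProd]
      rw [if_neg (by simpa using hv)]
      exact ih (fun q hq => h q (List.mem_cons_of_mem _ hq))

theorem pv_look_eq_none (l : List (String × String)) (v : String)
    (hv : v ∉ l.map Prod.fst) : pvLook l v = none := by
  unfold pvLook
  rw [List.find?_eq_none.mpr ?_]
  · rfl
  · intro p hp hbeq
    exact hv (by simpa [eq_of_beq hbeq] using List.mem_map_of_mem (f := Prod.fst) hp)

set_option maxRecDepth 100000 in
theorem pv_clim_keys_agree : ∀ x ∈ pvClimProd.map Prod.fst, pvFirstProd x pvClimRefs = pvLook pvClimProd x := by decide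
set_option maxRecDepth 100000 in
theorem pv_clim_cover : ∀ pr ∈ pvClimRefs, ∀ x ∈ pr.2, x ∈ pvClimProd.map Prod.fst := by decide
set_option maxRecDepth 100000 in
theorem pv_ts_keys_agree : ∀ x ∈ pvTsProd.map Prod.fst, pvFirstProd x pvTsRefs = pvLook pvTsProd x := by decide
set_option maxRecDepth 100000 in
theorem pv_ts_cover : ∀ pr ∈ pvTsRefs, ∀ x ∈ pr.2, x ∈ pvTsProd.map Prod.fst := by decide
set_option maxRecDepth 100000 in
theorem pv_tbl_keys_agree : ∀ x ∈ pvTableTbl.map Prod.fst, pvLook pvTableTbl x = pvTblSpec x := by decide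
set_option maxRecDepth 100000 in
theorem pv_tbl_cover : ∀ x ∈ (pvAmonVars ++ pvOmonVars ++ pvOImonVars), x ∈ pvTableTbl.map Prod.fst := by decide

theorem pv_clim_eq (v : String) : pvFirstProd v pvClimRefs = pvLook pvClimProd v := by
  by_cases hv : v ∈ pvClimProd.map Prod.fst
  · exact pv_clim_keys_agree v hv
  · rw [pv_firstProd_eq_none v _ (fun pr hpr hx => hv (pv_clim_cover pr hpr v hx)),
        pv_look_eq_none _ _ hv]

theorem pv_ts_eq (v : String) : pvFirstProd v pvTsRefs = pvLook pvTsProd v := by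
  by_cases hv : v ∈ pvTsProd.map Prod.fst
  · exact pv_ts_keys_agree v hv
  · rw [pv_firstProd_eq_none v _ (fun pr hpr hx => hv (pv_ts_cover pr hpr v hx)),
        pv_look_eq_none _ _ hv]

theorem pv_tbl_spec_none (v : String) (hv : v ∉ pvTableTbl.map Prod.fst) : pvTblSpec v = none := by
  unfold pvTblSpec
  have h1 : v ∉ pvOImonVars := fun h => hv (pv_tbl_cover v (by simp [h]))
  have h2 : v ∉ pvOmonVars := fun h => hv (pv_tbl_cover v (by simp [h]))
  have h3 : v ∉ pvAmonVars := fun h => hv (pv_tbl_cover v (by simp [h]))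
  simp [h1, h2, h3]

theorem pv_tbl_eq (v : String) : pvLook pvTableTbl v = pvTblSpec v := by
  by_cases hv : v ∈ pvTableTbl.map Prod.fst
  · exact pv_tbl_keys_agree v hv
  · rw [pv_look_eq_none _ _ hv, pv_tbl_spec_none v hv]

theorem pv_union_contains (v : String) :
    (pvAmonVars ++ pvOmonVars ++ pvOImonVars).contains v = (pvTblSpec v).isSome := by
  unfold pvTblSpec
  by_cases h1 : v ∈ pvOImonVars <;> by_cases h2 : v ∈ pvOmonVars <;>
    by_cases h3 : v ∈ pvAmonVars <;>
      simp [List.contains_eq_mem, List.mem_append, h1, h2, h3]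

theorem pv_chain_eq (v : String) :
    (let table := "*"
     let table := if pvAmonVars.contains v then "Amon" else table
     let table := if pvOmonVars.contains v then "Omon" else table
     let table := if pvOImonVars.contains v then "OImon" else table
     table) = (pvTblSpec v).getD "*" := by
  unfold pvTblSpec
  by_cases h1 : v ∈ pvOImonVars <;> by_cases h2 : v ∈ pvOmonVars <;>
    by_cases h3 : v ∈ pvAmonVars <;> simp [List.contains_eq_mem, h1, h2, h3]

-- A's loop result, written through pvFirstProd
theorem pv_loop_clim (v table : String) :
    ∀ L, variable2referenceLoop v "ref_climatos" table L
      = (pvFirstProd v L).map (fun product =>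
          [("project", "ref_climatos"), ("product", product), ("variable", v), ("frequency", "annual_cycle"), ("table", table)]) := by
  intro L
  induction L with
  | nil => simp [variable2referenceLoop, pvFirstProd]
  | cons pr L ih =>
    cases pr with
    | mk p vs =>
      by_cases h : v ∈ vs <;> simp [variable2referenceLoop, pvFirstProd, h, ih]

theorem pv_loop_ts (v table : String) :
    ∀ L, variable2referenceLoop v "ref_ts" table L
      = (pvFirstProd v L).map (fun product =>
          [("project", "ref_ts"), ("product", product), ("variable", v), ("frequency", "monthly")]) := by
  intro L
  induction L with
  | nil => simp [variable2referenceLoop, pvFirstProd]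
  | cons pr L ih =>
    cases pr with
    | mk p vs =>
      by_cases h : v ∈ vs <;> simp [variable2referenceLoop, pvFirstProd, h, ih]

-- the project dispatch tails of the two ports agree, for any project/table strings
theorem pv_tail_eq (v proj table : String) :
    (if proj == "ref_climatos" then variable2referenceLoop v proj table pvClimRefs
     else if proj == "ref_ts" then variable2referenceLoop v proj table pvTsRefs
     else none)
    = (if proj == "ref_climatos" then
         match (PySem.Dict.ofList pvClimProd).get? v with
         | some product => some [("project", proj), ("product", product), ("variable", v), ("frequency", "annual_cycle"), ("table", table)]
         | none => none
       else if proj == "ref_ts" then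
         match (PySem.Dict.ofList pvTsProd).get? v with
         | some product => some [("project", proj), ("product", product), ("variable", v), ("frequency", "monthly")]
         | none => none
       else none) := by
  by_cases h1 : proj = "ref_climatos"
  · subst h1
    simp only [beq_self_eq_true, if_pos]
    rw [pv_loop_clim, pv_get?_of_items _ _ _ pv_items_clim, ← pv_clim_eq]
    cases h : pvFirstProd v pvClimRefs <;> simp
  · by_cases h2 : proj = "ref_ts"
    · subst h2
      simp only [show (("ref_ts" : String) == "ref_climatos") = false from rfl]
      simp only [Bool.false_eq_true, if_false, beq_self_eq_true, if_pos]
      rw [pv_loop_ts, pv_get?_of_items _ _ _ pv_items_ts, ← pv_ts_eq]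
      cases h : pvFirstProd v pvTsRefs <;> simp
    · simp [h1, h2]


-- ===== VERDICT (by name: the statement is the Claim_ definition above) =====
set_option maxRecDepth 100000 in
theorem variable2reference_spec : Claim_equal_variable2reference := by
  intro v project my_obs _
  unfold Spec_variable2reference
  unfold variable2reference variable2reference_alt
  cases hf : (PySem.Dict.ofList my_obs).get? v with
  | some inner => rfl
  | none =>
    simp only []
    by_cases hp : project.getD "" = ""
    · simp only [hp, if_pos]
      have hc : (PySem.Dict.ofList pvTableTbl).contains v
          = (pvAmonVars ++ pvOmonVars ++ pvOImonVars).contains v := by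
        rw [PySem.Dict.contains_eq_isSome_get?, pv_get?_of_items _ _ _ pv_items_tbl,
            pv_tbl_eq, pv_union_contains]
      have hg : (PySem.Dict.ofList pvTableTbl).getD v "*" = (pvTblSpec v).getD "*" := by
        rw [PySem.Dict.getD_eq_get?_getD, pv_get?_of_items _ _ _ pv_items_tbl, pv_tbl_eq]
      rw [hc, hg, ← pv_chain_eq]
      by_cases hu : (pvAmonVars ++ pvOmonVars ++ pvOImonVars).contains v
      · simp only [hu, if_pos]
        exact pv_tail_eq v _ _
      · simp only [Bool.not_eq_true] at hu
        simp only [hu, Bool.false_eq_true, if_false]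
        exact pv_tail_eq v _ _
    · simp only [if_neg hp]
      exact pv_tail_eq v _ _
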